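-- pv_equiv track=rewrite | github.com/ICPC-Caribbean/icpc-carib-2021 | problems/xorsum/solutions/good/ernestico_py-ac.py | get_best_with_2
-- ===== SOURCE A (Python) =====
-- def get_best_with_2(a, b):
--     ret = 0
--     for i in range(30):
--         if (a&(1<<i)) == (b&(1<<i)):
--             ret += 2 * (1<<i)
--         else:
--             ret += 3 * (1<<i)
--     return ret
-- ===== SOURCE B (Python) =====
-- def get_best_with_2(a, b):
--     return 2 * (2 ** 30 - 1) + ((a ^ b) % (1 << 30))
-- ===== Notes on version B (the rewrite author's own statement) =====
-- stated objective: simpler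
-- what changed: Replaced the 30-iteration per-bit loop with a one-line closed form: every bit contributes 2*2^i, and differing bits one extra 2^i, so the result is 2*(2**30-1) + ((a ^ b) % (1 << 30)).
import Mathlib
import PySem

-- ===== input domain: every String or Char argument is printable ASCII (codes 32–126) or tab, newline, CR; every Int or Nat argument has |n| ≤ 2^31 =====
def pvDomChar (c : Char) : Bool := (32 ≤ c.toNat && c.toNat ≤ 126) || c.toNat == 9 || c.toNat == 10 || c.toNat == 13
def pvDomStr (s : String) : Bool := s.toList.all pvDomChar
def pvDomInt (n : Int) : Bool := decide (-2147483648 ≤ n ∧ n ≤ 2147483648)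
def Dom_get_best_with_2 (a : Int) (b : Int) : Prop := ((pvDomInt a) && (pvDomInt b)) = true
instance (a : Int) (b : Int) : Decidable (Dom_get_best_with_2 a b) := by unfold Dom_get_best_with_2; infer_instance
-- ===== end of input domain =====

-- B replaces A's 30-iteration per-bit loop by the closed form 2*(2^30-1) + ((a^b) mod 2^30) (simpler).

-- ===== PORT A =====
def get_best_with_2 (a : Int) (b : Int) : Int :=
  (List.range 30).foldl
    (fun (ret : Int) (i : Nat) =>
      if PySem.Int.band a ((1 : Int) <<< i) = PySem.Int.band b ((1 : Int) <<< i) then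
        ret + 2 * ((1 : Int) <<< i)
      else
        ret + 3 * ((1 : Int) <<< i))
    0

-- ===== PORT B =====
def get_best_with_2_alt (a : Int) (b : Int) : Int :=
  2 * (2 ^ 30 - 1) + PySem.Int.mod (PySem.Int.bxor a b) ((1 : Int) <<< 30)

-- ===== PRECONDITION & SPEC =====
def Spec_get_best_with_2 (a : Int) (b : Int) (out : Int) : Prop := out = get_best_with_2_alt a b
instance (a : Int) (b : Int) (out : Int) : Decidable (Spec_get_best_with_2 a b out) := by unfold Spec_get_best_with_2; infer_instance

-- ===== CLAIM (what is proved, stated in full; the proofs are below) =====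
def Claim_equal_get_best_with_2 : Prop := ∀ (a : Int) (b : Int), Dom_get_best_with_2 a b → Spec_get_best_with_2 a b (get_best_with_2 a b)

-- ===== LEMMAS AND PROOFS =====

/-- Python's bit `i` of an arbitrary integer (two's complement on negatives). -/
def pvBit (x : Int) (i : Nat) : Bool :=
  if 0 ≤ x then x.toNat.testBit i else !((-x - 1).toNat.testBit i)

theorem pv_two_pow_toNat (i : Nat) : ((2 : Int) ^ i).toNat = 2 ^ i := by
  have h : ((2 : Int) ^ i) = ((2 ^ i : Nat) : Int) := by push_cast; ring
  rw [h, Int.toNat_natCast]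

theorem pv_band_two_pow (x : Int) (i : Nat) :
    PySem.Int.band x ((2 : Int) ^ i) = if pvBit x i then (2 : Int) ^ i else 0 := by
  have h2 : (0 : Int) ≤ 2 ^ i := by positivity
  unfold PySem.Int.band pvBit
  by_cases hx : 0 ≤ x
  · rw [if_pos hx, if_pos h2, if_pos hx, pv_two_pow_toNat, Nat.and_two_pow]
    cases hbit : x.toNat.testBit i <;> simp
  · rw [if_neg hx, if_pos h2, if_neg hx, pv_two_pow_toNat, Nat.two_pow_and]
    cases hbit : (-x - 1).toNat.testBit i
    · simp only [Bool.toNat_false, Nat.mul_zero, Nat.sub_zero, Bool.not_false, if_pos]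
      push_cast; ring
    · simp

theorem pv_cond_iff (a b : Int) (i : Nat) :
    (PySem.Int.band a ((2 : Int) ^ i) = PySem.Int.band b ((2 : Int) ^ i)) ↔ pvBit a i = pvBit b i := by
  have h2 : (2 : Int) ^ i ≠ 0 := by positivity
  rw [pv_band_two_pow, pv_band_two_pow]
  cases ha : pvBit a i <;> cases hb : pvBit b i <;> simp [h2, h2.symm]

theorem pv_bxor_bit (a b : Int) (i : Nat) :
    pvBit (PySem.Int.bxor a b) i = xor (pvBit a i) (pvBit b i) := by
  unfold PySem.Int.bxor pvBit
  by_cases ha : 0 ≤ a <;> by_cases hb : 0 ≤ b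
  · rw [if_pos ha, if_pos hb, if_pos ha, if_pos hb]
    rw [if_pos (by positivity : (0:Int) ≤ ((a.toNat ^^^ b.toNat : Nat) : Int))]
    simp [Nat.testBit_xor]
  · rw [if_pos ha, if_neg hb, if_pos ha, if_neg hb]
    have hv : ¬ (0:Int) ≤ -((a.toNat ^^^ (-b - 1).toNat : Nat) : Int) - 1 := by
      have : (0:Int) ≤ ((a.toNat ^^^ (-b - 1).toNat : Nat) : Int) := by positivity
      omega
    rw [if_neg hv]
    have harg : (-(-((a.toNat ^^^ (-b - 1).toNat : Nat) : Int) - 1) - 1).toNat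
        = a.toNat ^^^ (-b - 1).toNat := by omega
    rw [harg]
    simp [Nat.testBit_xor]
  · rw [if_neg ha, if_pos hb, if_neg ha, if_pos hb]
    have hv : ¬ (0:Int) ≤ -(((-a - 1).toNat ^^^ b.toNat : Nat) : Int) - 1 := by
      have : (0:Int) ≤ (((-a - 1).toNat ^^^ b.toNat : Nat) : Int) := by positivity
      omega
    rw [if_neg hv]
    have harg : (-(-(((-a - 1).toNat ^^^ b.toNat : Nat) : Int) - 1) - 1).toNat
        = (-a - 1).toNat ^^^ b.toNat := by omega
    rw [harg]
    simp [Nat.testBit_xor]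
  · rw [if_neg ha, if_neg hb, if_neg ha, if_neg hb]
    rw [if_pos (by positivity : (0:Int) ≤ (((-a - 1).toNat ^^^ (-b - 1).toNat : Nat) : Int))]
    simp [Nat.testBit_xor]

theorem pv_emod_two_pow_nonneg (x : Int) (hx : 0 ≤ x) (k : Nat) :
    x % ((2 : Int) ^ k) = ((x.toNat % 2 ^ k : Nat) : Int) := by
  conv_lhs => rw [← Int.toNat_of_nonneg hx]
  push_cast
  rfl

theorem pv_emod_two_pow_neg (x : Int) (hx : x < 0) (k : Nat) :
    x % ((2 : Int) ^ k) = (2 : Int) ^ k - 1 - (((-x - 1).toNat % 2 ^ k : Nat) : Int) := by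
  set m : Nat := (-x - 1).toNat with hm
  have hxm : x = -(m : Int) - 1 := by omega
  have hsplit : (m : Int) = 2 ^ k * ((m / 2 ^ k : Nat) : Int) + ((m % 2 ^ k : Nat) : Int) := by
    have h := Nat.div_add_mod m (2 ^ k)
    have h0 : ((2 : Int) ^ k) * ((m / 2 ^ k : Nat) : Int) + ((m % 2 ^ k : Nat) : Int) = (m : Int) := by
      exact_mod_cast congrArg (Nat.cast : Nat → Int) h
    linarith
  have hrange : ((m % 2 ^ k : Nat) : Int) < 2 ^ k := by
    exact_mod_cast Nat.mod_lt m (y := 2 ^ k) (by positivity)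
  have hnn : (0:Int) ≤ ((m % 2 ^ k : Nat) : Int) := by positivity
  have hx' : x = ((2 : Int) ^ k - 1 - ((m % 2 ^ k : Nat) : Int)) + (2 : Int) ^ k * (-((m / 2 ^ k : Nat) : Int) - 1) := by
    rw [hxm]
    conv_lhs => rw [hsplit]
    ring
  rw [hx', Int.add_mul_emod_self_left, Int.emod_eq_of_lt (by omega) (by omega)]

theorem pv_emod_succ (x : Int) (N : Nat) :
    x % ((2 : Int) ^ (N + 1)) = x % ((2 : Int) ^ N) + (if pvBit x N then (2 : Int) ^ N else 0) := by
  by_cases hx : 0 ≤ x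
  · rw [pv_emod_two_pow_nonneg x hx, pv_emod_two_pow_nonneg x hx]
    have hmod : x.toNat % 2 ^ (N + 1) = x.toNat % 2 ^ N + 2 ^ N * (x.toNat / 2 ^ N % 2) :=
      Nat.mod_pow_succ
    have htb : x.toNat.testBit N = decide (x.toNat / 2 ^ N % 2 = 1) :=
      Nat.testBit_eq_decide_div_mod_eq
    have hb : pvBit x N = decide (x.toNat / 2 ^ N % 2 = 1) := by
      unfold pvBit; rw [if_pos hx, htb]
    have h01 : x.toNat / 2 ^ N % 2 = 0 ∨ x.toNat / 2 ^ N % 2 = 1 := by omega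
    rcases h01 with h | h <;> rw [hb, hmod, h] <;> simp
  · have hx' : x < 0 := by omega
    rw [pv_emod_two_pow_neg x hx', pv_emod_two_pow_neg x hx']
    set m : Nat := (-x - 1).toNat with hm
    have hmod : m % 2 ^ (N + 1) = m % 2 ^ N + 2 ^ N * (m / 2 ^ N % 2) := Nat.mod_pow_succ
    have htb : m.testBit N = decide (m / 2 ^ N % 2 = 1) := Nat.testBit_eq_decide_div_mod_eq
    have hb : pvBit x N = !decide (m / 2 ^ N % 2 = 1) := by
      unfold pvBit; rw [if_neg hx, ← hm, htb]
    have h01 : m / 2 ^ N % 2 = 0 ∨ m / 2 ^ N % 2 = 1 := by omega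
    rcases h01 with h | h <;>
      rw [hb, h] <;>
      simp only [Nat.zero_ne_one, decide_false, Bool.not_false, if_pos,
        decide_true, Bool.not_true, Bool.false_eq_true, if_false] <;>
      rw [hmod, h] <;> push_cast <;> ring

theorem pv_loop (a b : Int) (n : Nat) :
    (List.range n).foldl
      (fun (ret : Int) (i : Nat) =>
        if PySem.Int.band a ((1 : Int) <<< i) = PySem.Int.band b ((1 : Int) <<< i) then
          ret + 2 * ((1 : Int) <<< i)
        else
          ret + 3 * ((1 : Int) <<< i))
      0
    = 2 * ((2 : Int) ^ n - 1) + (PySem.Int.bxor a b) % ((2 : Int) ^ n) := by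
  induction n with
  | zero => simp
  | succ n ih =>
    rw [List.range_succ, List.foldl_append, List.foldl_cons, List.foldl_nil, ih]
    have hsh : ((1 : Int) <<< n) = (2 : Int) ^ n := by rw [Int.shiftLeft_eq]; ring
    rw [hsh, pv_emod_succ (PySem.Int.bxor a b) n]
    by_cases hc : pvBit (PySem.Int.bxor a b) n
    · have hne : ¬ (pvBit a n = pvBit b n) := by
        rw [pv_bxor_bit] at hc
        cases hA : pvBit a n <;> cases hB : pvBit b n <;> simp [hA, hB] at hc ⊢
      rw [if_neg ((pv_cond_iff a b n).not.mpr hne), if_pos hc]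
      ring
    · have heq : pvBit a n = pvBit b n := by
        rw [pv_bxor_bit] at hc
        cases hA : pvBit a n <;> cases hB : pvBit b n <;> simp [hA, hB] at hc ⊢
      rw [if_pos ((pv_cond_iff a b n).mpr heq), if_neg hc]
      ring

-- ===== VERDICT (by name: the statement is the Claim_ definition above) =====
theorem get_best_with_2_spec : Claim_equal_get_best_with_2 := by
  intro a b _
  unfold Spec_get_best_with_2 get_best_with_2 get_best_with_2_alt
  rw [pv_loop a b 30]
  have hpos : (0 : Int) < (1 : Int) <<< 30 := by decide
  rw [PySem.Int.mod_eq_emod_of_pos hpos]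
  have h30 : ((1 : Int) <<< 30) = (2 : Int) ^ 30 := by decide
  rw [h30]
  norm_num
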